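-- pv_equiv track=rewrite | github.com/fieldjoshua/LightBox_LB1 | utils/frame_utils.py | shift_frame
-- ===== SOURCE A (Python) =====
-- from typing import List, Tuple, Optional, Any
--
-- def shift_frame(frame: List[Tuple[int, int, int]],
--                 width: int, height: int,
--                 dx: int, dy: int,
--                 wrap: bool = True) -> List[Tuple[int, int, int]]:
--     """
--     Shift frame contents by dx, dy pixels.
--
--     Args:
--         frame: Input frame
--         width: Frame width
--         height: Frame height
--         dx: Horizontal shift (positive = right)
--         dy: Vertical shift (positive = down)
--         wrap: Whether to wrap pixels around edges
--
--     Returns: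
--         Shifted frame
--     """
--     result = [(0, 0, 0)] * len(frame)
--
--     for y in range(height):
--         for x in range(width):
--             src_x = x - dx
--             src_y = y - dy
--
--             if wrap:
--                 src_x = src_x % width
--                 src_y = src_y % height
--
--             if 0 <= src_x < width and 0 <= src_y < height:
--                 src_idx = src_y * width + src_x
--                 dst_idx = y * width + x
--                 if 0 <= src_idx < len(frame) and 0 <= dst_idx < len(result):
--                     result[dst_idx] = frame[src_idx]
--
--     return result
-- ===== SOURCE B (Python) =====
-- from typing import List, Tuple
--
--
-- def _shift_list(lst, k, filler):
--     # shift lst right by k (left for negative k), filling vacated slots with filler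
--     L = len(lst)
--     if k >= 0:
--         kk = min(k, L)
--         return [filler] * kk + lst[:L - kk]
--     else:
--         kk = min(-k, L)
--         return lst[kk:] + [filler] * kk
--
--
-- def shift_frame(frame: List[Tuple[int, int, int]],
--                 width: int, height: int,
--                 dx: int, dy: int,
--                 wrap: bool = True) -> List[Tuple[int, int, int]]:
--     # Block decomposition: pad the frame to a width*height grid of rows, shift the
--     # whole grid with row/column slice operations (rotation for wrap, black-fill
--     # shift otherwise), then flatten and fit back to the original frame length.
--     BLACK = (0, 0, 0)
--     n = len(frame)
--     if width <= 0 or height <= 0: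
--         return [BLACK] * n
--     size = width * height
--     padded = frame[:size] + [BLACK] * max(0, size - n)
--     rows = [padded[r * width:(r + 1) * width] for r in range(height)]
--     if wrap:
--         kx = (-dx) % width
--         rows = [row[kx:] + row[:kx] for row in rows]
--         ky = (-dy) % height
--         rows = rows[ky:] + rows[:ky]
--     else:
--         rows = [_shift_list(row, dx, BLACK) for row in rows]
--         rows = _shift_list(rows, dy, [BLACK] * width)
--     shifted = [p for row in rows for p in row]
--     return shifted[:n] + [BLACK] * max(0, n - size)
-- ===== Notes on version B (the rewrite author's own statement) =====
-- stated objective: alternative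
-- what changed: B replaces A's per-pixel nested gather loops by whole-row block slicing: it pads the frame to a width*height grid of rows, shifts the grid with slice operations (row/column rotation for wrap, black-filled slice shift otherwise), flattens, and fits the result back to the original frame length; the two coincide including floor-modulo wrap and the len(frame)!=width*height guards.
import Mathlib
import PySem

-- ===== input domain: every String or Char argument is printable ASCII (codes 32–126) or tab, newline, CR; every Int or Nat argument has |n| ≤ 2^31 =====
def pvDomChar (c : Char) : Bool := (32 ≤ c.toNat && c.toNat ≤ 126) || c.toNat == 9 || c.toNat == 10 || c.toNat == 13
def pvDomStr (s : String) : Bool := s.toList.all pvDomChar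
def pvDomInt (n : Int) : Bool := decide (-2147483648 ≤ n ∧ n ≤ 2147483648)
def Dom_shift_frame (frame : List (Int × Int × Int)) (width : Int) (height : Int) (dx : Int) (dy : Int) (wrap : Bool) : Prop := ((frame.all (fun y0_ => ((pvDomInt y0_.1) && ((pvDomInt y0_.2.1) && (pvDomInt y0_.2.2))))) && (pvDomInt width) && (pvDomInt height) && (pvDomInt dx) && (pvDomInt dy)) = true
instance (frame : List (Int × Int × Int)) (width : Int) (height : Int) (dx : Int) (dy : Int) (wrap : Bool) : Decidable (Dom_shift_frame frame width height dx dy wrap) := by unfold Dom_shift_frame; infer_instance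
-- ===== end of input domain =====

-- B replaces A's per-pixel nested gather loops by whole-row block slicing (pad to a
-- width*height grid of rows, shift the grid with slice operations — rotation for wrap,
-- black-filled shift otherwise — flatten, refit to the frame length); objective: alternative.

-- ===== PORT A =====
def shift_frame (frame : List (Int × Int × Int)) (width : Int) (height : Int) (dx : Int) (dy : Int) (wrap : Bool) : List (Int × Int × Int) :=
  let result := List.replicate frame.length ((0:Int), (0:Int), (0:Int))
  (PySem.List.pyRange 0 height 1).foldl (fun result y =>
    (PySem.List.pyRange 0 width 1).foldl (fun result x =>
      let src_x := x - dx
      let src_y := y - dy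
      let src_x := if wrap then PySem.Int.mod src_x width else src_x
      let src_y := if wrap then PySem.Int.mod src_y height else src_y
      if 0 ≤ src_x ∧ src_x < width ∧ 0 ≤ src_y ∧ src_y < height then
        let src_idx := src_y * width + src_x
        let dst_idx := y * width + x
        if 0 ≤ src_idx ∧ src_idx < (frame.length : Int) ∧ 0 ≤ dst_idx ∧ dst_idx < (frame.length : Int) then
          result.set dst_idx.toNat (frame.getD src_idx.toNat ((0:Int), (0:Int), (0:Int)))
        else result
      else result) result) result

-- ===== PORT B =====
-- helper _shift_list of Source B: shift a list right by k (left for k < 0), filling with `filler`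
def pvShiftList {α : Type} (lst : List α) (k : Int) (filler : α) : List α :=
  if 0 ≤ k then
    let kk := min k (lst.length : Int)
    List.replicate kk.toNat filler ++ lst.take ((lst.length : Int) - kk).toNat
  else
    let kk := min (-k) (lst.length : Int)
    lst.drop kk.toNat ++ List.replicate kk.toNat filler

def shift_frame_alt (frame : List (Int × Int × Int)) (width : Int) (height : Int) (dx : Int) (dy : Int) (wrap : Bool) : List (Int × Int × Int) :=
  let BLACK : Int × Int × Int := (0, 0, 0)
  let n := frame.length
  if width ≤ 0 ∨ height ≤ 0 then List.replicate n BLACK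
  else
    let size := width * height
    let padded := frame.take size.toNat ++ List.replicate (size.toNat - n) BLACK
    -- Python list slicing indexes an array; ported as Array.extract, which is exact here
    -- (bounds are nonnegative, and extract = drop/take) and keeps evaluation linear
    let paddedArr := padded.toArray
    let rows := (PySem.List.pyRange 0 height 1).map (fun r => (paddedArr.extract (r * width).toNat ((r + 1) * width).toNat).toList)
    let rows2 := if wrap then
        let kx := PySem.Int.mod (-dx) width
        let rows' := rows.map (fun row => PySem.List.slice row (some kx) none ++ PySem.List.slice row none (some kx))
        let ky := PySem.Int.mod (-dy) height
        PySem.List.slice rows' (some ky) none ++ PySem.List.slice rows' none (some ky)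
      else
        let rows' := rows.map (fun row => pvShiftList row dx BLACK)
        pvShiftList rows' dy (List.replicate width.toNat BLACK)
    let shifted := rows2.flatMap id
    shifted.take n ++ List.replicate (n - size.toNat) BLACK

-- ===== PRECONDITION & SPEC =====
def Spec_shift_frame (frame : List (Int × Int × Int)) (width : Int) (height : Int) (dx : Int) (dy : Int) (wrap : Bool) (out : List (Int × Int × Int)) : Prop := out = shift_frame_alt frame width height dx dy wrap
instance (frame : List (Int × Int × Int)) (width : Int) (height : Int) (dx : Int) (dy : Int) (wrap : Bool) (out : List (Int × Int × Int)) : Decidable (Spec_shift_frame frame width height dx dy wrap out) := by unfold Spec_shift_frame; infer_instance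

-- ===== CLAIM (what is proved, stated in full; the proofs are below) =====
def Claim_equal_shift_frame : Prop := ∀ (frame : List (Int × Int × Int)) (width : Int) (height : Int) (dx : Int) (dy : Int) (wrap : Bool), Dom_shift_frame frame width height dx dy wrap → Spec_shift_frame frame width height dx dy wrap (shift_frame frame width height dx dy wrap)

-- ===== LEMMAS AND PROOFS =====

-- the pixel value both programs place at destination grid cell (y, x)
def pvGather (frame : List (Int × Int × Int)) (width height dx dy : Int) (wrap : Bool) (y x : Int) : Int × Int × Int :=
  if 0 ≤ (if wrap then PySem.Int.mod (x - dx) width else x - dx) ∧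
     (if wrap then PySem.Int.mod (x - dx) width else x - dx) < width ∧
     0 ≤ (if wrap then PySem.Int.mod (y - dy) height else y - dy) ∧
     (if wrap then PySem.Int.mod (y - dy) height else y - dy) < height then
    frame.getD ((if wrap then PySem.Int.mod (y - dy) height else y - dy) * width +
                (if wrap then PySem.Int.mod (x - dx) width else x - dx)).toNat ((0:Int), (0:Int), (0:Int))
  else ((0:Int), (0:Int), (0:Int))

-- the value at flat result index j (black beyond the grid)
def pvVal (frame : List (Int × Int × Int)) (width height dx dy : Int) (wrap : Bool) (j : Nat) : Int × Int × Int :=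
  if (j : Int) < width * height then
    pvGather frame width height dx dy wrap ((j : Int) / width) ((j : Int) % width)
  else ((0:Int), (0:Int), (0:Int))

theorem pvGather_wrap (frame : List (Int × Int × Int)) (width height dx dy : Int) (y x : Int)
    (hw : 0 < width) (hh : 0 < height) :
    pvGather frame width height dx dy true y x =
      frame.getD (PySem.Int.mod (y - dy) height * width + PySem.Int.mod (x - dx) width).toNat ((0:Int), (0:Int), (0:Int)) := by
  unfold pvGather
  rw [show (if (true : Bool) = true then PySem.Int.mod (x - dx) width else x - dx) = PySem.Int.mod (x - dx) width from if_pos rfl,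
      show (if (true : Bool) = true then PySem.Int.mod (y - dy) height else y - dy) = PySem.Int.mod (y - dy) height from if_pos rfl]
  rw [if_pos ⟨PySem.Int.mod_nonneg _ hw, PySem.Int.mod_lt _ hw, PySem.Int.mod_nonneg _ hh, PySem.Int.mod_lt _ hh⟩]

theorem pvGather_nowrap (frame : List (Int × Int × Int)) (width height dx dy : Int) (y x : Int) :
    pvGather frame width height dx dy false y x =
      if 0 ≤ x - dx ∧ x - dx < width ∧ 0 ≤ y - dy ∧ y - dy < height then
        frame.getD ((y - dy) * width + (x - dx)).toNat ((0:Int), (0:Int), (0:Int))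
      else ((0:Int), (0:Int), (0:Int)) := by
  unfold pvGather
  rw [show (if (false : Bool) = true then PySem.Int.mod (x - dx) width else x - dx) = x - dx from if_neg (by simp),
      show (if (false : Bool) = true then PySem.Int.mod (y - dy) height else y - dy) = y - dy from if_neg (by simp)]

-- ---- generic list helpers ----

theorem pvBindSome {α β : Type} (a : α) (f : α → Option β) : (some a).bind f = f a := rfl

theorem pvGetD_of_getElem? {α : Type} (l : List α) (i : Nat) (d v : α) (h : l[i]? = some v) : l.getD i d = v := by
  simp [List.getD, h]

theorem pvGetD_default {α : Type} (l : List α) (i : Nat) (d : α) (h : l.length ≤ i) : l.getD i d = d := by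
  simp [List.getD, List.getElem?_eq_none h]

theorem pvGetElem?_eq_getD {α : Type} (l : List α) (i : Nat) (d : α) (h : i < l.length) :
    l[i]? = some (l.getD i d) := by
  rw [pvGetD_of_getElem? l i d _ (List.getElem?_eq_getElem h)]
  exact List.getElem?_eq_getElem h

-- rotation built from two slices, pointwise
theorem pvRot_getElem? {α : Type} (l : List α) (K : Nat) (hK : K ≤ l.length) (x : Nat) (hx : x < l.length) :
    (l.drop K ++ l.take K)[x]? = l[(x + K) % l.length]? := by
  have hdl : (l.drop K).length = l.length - K := by simp
  by_cases h : x < l.length - K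
  · rw [List.getElem?_append_left (by omega)]
    rw [List.getElem?_drop]
    congr 1
    rw [Nat.mod_eq_of_lt (by omega)]
    omega
  · rw [List.getElem?_append_right (by omega), hdl]
    have h2 : (x + K) % l.length = x - (l.length - K) := by
      rw [Nat.mod_eq_sub_mod (by omega), Nat.mod_eq_of_lt (by omega)]
      omega
    rw [h2]
    rw [List.getElem?_take]
    rw [if_pos (by omega)]

-- uniform-width flatten, pointwise
theorem pvFlatten_getElem? {α : Type} (rows : List (List α)) (W : Nat) (hW : 0 < W)
    (hlen : ∀ r ∈ rows, r.length = W) (j : Nat) (hj : j < rows.length * W) :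
    rows.flatten[j]? = rows[j / W]?.bind (fun row => row[j % W]?) := by
  induction rows generalizing j with
  | nil => simp at hj
  | cons r rs ih =>
    have hr : r.length = W := hlen r (by simp)
    rw [List.flatten_cons]
    by_cases h : j < W
    · rw [List.getElem?_append_left (by omega)]
      rw [Nat.div_eq_of_lt h, Nat.mod_eq_of_lt h]
      simp
    · rw [List.getElem?_append_right (by omega), hr]
      have hm : j = (j - W) + W := by omega
      have hlt : j - W < rs.length * W := by
        have : (rs.length + 1) * W = rs.length * W + W := by ring
        simp only [List.length_cons] at hj
        omega
      rw [ih (fun q hq => hlen q (by simp [hq])) (j - W) hlt]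
      have h1 : j / W = (j - W) / W + 1 := by
        conv_lhs => rw [hm]
        rw [Nat.add_div_right _ hW]
      have h2 : j % W = (j - W) % W := by
        conv_lhs => rw [hm]
        rw [Nat.add_mod_right]
      rw [h1, h2, List.getElem?_cons_succ]

theorem pvShiftList_length {α : Type} (lst : List α) (k : Int) (filler : α) :
    (pvShiftList lst k filler).length = lst.length := by
  unfold pvShiftList
  split_ifs <;> simp <;> omega

theorem pvShiftList_getElem? {α : Type} (lst : List α) (k : Int) (filler : α) (x : Nat) (hx : x < lst.length) :
    (pvShiftList lst k filler)[x]? =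
      some (if 0 ≤ (x : Int) - k ∧ (x : Int) - k < (lst.length : Int) then lst.getD ((x : Int) - k).toNat filler else filler) := by
  unfold pvShiftList
  by_cases hk : 0 ≤ k
  · rw [if_pos hk]
    by_cases h1 : x < (min k (lst.length : Int)).toNat
    · rw [List.getElem?_append_left (by rw [List.length_replicate]; exact h1)]
      rw [List.getElem?_replicate, if_pos h1, if_neg (by omega)]
    · have hkL : k ≤ (lst.length : Int) := by omega
      rw [List.getElem?_append_right (by rw [List.length_replicate]; omega)]
      rw [List.length_replicate]
      rw [List.getElem?_take, if_pos (by omega)]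
      rw [show x - (min k (lst.length : Int)).toNat = ((x : Int) - k).toNat from by omega]
      rw [pvGetElem?_eq_getD lst _ filler (by omega)]
      rw [if_pos (by omega)]
  · rw [if_neg hk]
    by_cases h1 : x < lst.length - (min (-k) (lst.length : Int)).toNat
    · rw [List.getElem?_append_left (by rw [List.length_drop]; omega)]
      rw [List.getElem?_drop]
      rw [show (min (-k) (lst.length : Int)).toNat + x = ((x : Int) - k).toNat from by omega]
      rw [pvGetElem?_eq_getD lst _ filler (by omega)]
      rw [if_pos (by omega)]
    · rw [List.getElem?_append_right (by rw [List.length_drop]; omega)]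
      rw [List.length_drop]
      rw [List.getElem?_replicate, if_pos (by omega)]
      rw [if_neg (by omega)]

theorem pvShiftList_mem {α : Type} (lst : List α) (k : Int) (filler : α) (q : α)
    (hq : q ∈ pvShiftList lst k filler) : q = filler ∨ q ∈ lst := by
  unfold pvShiftList at hq
  split_ifs at hq <;> simp only [List.mem_append, List.mem_replicate] at hq
  · rcases hq with h | h
    · exact Or.inl h.2
    · exact Or.inr (List.mem_of_mem_take h)
  · rcases hq with h | h
    · exact Or.inr (List.mem_of_mem_drop h)
    · exact Or.inl h.2

-- ---- A-side machinery: the nested loops as a list of writes ----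

def pvWriteA (frame : List (Int × Int × Int)) (width height dx dy : Int) (wrap : Bool) (y x : Int) : Option (Nat × (Int × Int × Int)) :=
  if 0 ≤ (if wrap then PySem.Int.mod (x - dx) width else x - dx) ∧
     (if wrap then PySem.Int.mod (x - dx) width else x - dx) < width ∧
     0 ≤ (if wrap then PySem.Int.mod (y - dy) height else y - dy) ∧
     (if wrap then PySem.Int.mod (y - dy) height else y - dy) < height then
    if 0 ≤ (if wrap then PySem.Int.mod (y - dy) height else y - dy) * width + (if wrap then PySem.Int.mod (x - dx) width else x - dx) ∧
       (if wrap then PySem.Int.mod (y - dy) height else y - dy) * width + (if wrap then PySem.Int.mod (x - dx) width else x - dx) < (frame.length : Int) ∧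
       0 ≤ y * width + x ∧ y * width + x < (frame.length : Int) then
      some ((y * width + x).toNat,
        frame.getD ((if wrap then PySem.Int.mod (y - dy) height else y - dy) * width +
                    (if wrap then PySem.Int.mod (x - dx) width else x - dx)).toNat ((0:Int), (0:Int), (0:Int)))
    else none
  else none

def pvApply (init : List (Int × Int × Int)) (ps : List (Nat × (Int × Int × Int))) : List (Int × Int × Int) :=
  ps.foldl (fun r p => r.set p.1 p.2) init

def pvPsA (frame : List (Int × Int × Int)) (width height dx dy : Int) (wrap : Bool) : List (Nat × (Int × Int × Int)) :=
  (PySem.List.pyRange 0 height 1).flatMap (fun y => (PySem.List.pyRange 0 width 1).filterMap (pvWriteA frame width height dx dy wrap y))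

theorem pvApply_char (ps : List (Nat × (Int × Int × Int))) (init : List (Int × Int × Int))
    (g : Nat → Option (Int × Int × Int))
    (h1 : ∀ p ∈ ps, g p.1 = some p.2 ∧ p.1 < init.length) (j : Nat) :
    (pvApply init ps)[j]? = if ps.any (fun p => p.1 == j) then g j else init[j]? := by
  induction ps generalizing init with
  | nil => simp [pvApply]
  | cons p ps ih =>
    have hp := h1 p (by simp)
    have hrest : ∀ q ∈ ps, g q.1 = some q.2 ∧ q.1 < (init.set p.1 p.2).length := by
      intro q hq; simpa using h1 q (by simp [hq])
    have := ih (init.set p.1 p.2) hrest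
    simp only [pvApply, List.foldl_cons] at this ⊢
    rw [this]
    by_cases hany : ps.any (fun q => q.1 == j)
    · simp [hany]
    · by_cases hj : p.1 = j
      · subst hj
        simp [hany, List.getElem?_set_self (by omega : p.1 < init.length), hp.1]
      · simp [hany, hj, List.getElem?_set_ne (by omega : p.1 ≠ j)]

theorem pvApply_length (init : List (Int × Int × Int)) (ps : List (Nat × (Int × Int × Int))) :
    (pvApply init ps).length = init.length := by
  induction ps generalizing init with
  | nil => rfl
  | cons p ps ih =>
    simp only [pvApply, List.foldl_cons] at *
    rw [ih]
    simp

theorem pvDiv (w y x : Int) (h0x : 0 ≤ x) (hxw : x < w) : (y * w + x) / w = y := by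
  rw [add_comm, Int.add_mul_ediv_right _ _ (by omega : w ≠ 0), Int.ediv_eq_zero_of_lt h0x hxw, zero_add]

theorem pvMod (w y x : Int) (h0x : 0 ≤ x) (hxw : x < w) : (y * w + x) % w = x := by
  rw [add_comm, mul_comm, Int.add_mul_emod_self_left]
  exact Int.emod_eq_of_lt h0x hxw

theorem pvApply_filterMap (f : Int → Option (Nat × (Int × Int × Int))) (l : List Int) (init : List (Int × Int × Int)) :
    pvApply init (l.filterMap f) = l.foldl (fun r x => match f x with | some p => r.set p.1 p.2 | none => r) init := by
  induction l generalizing init with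
  | nil => rfl
  | cons a l ih =>
    cases hfa : f a <;> simp [pvApply, hfa, List.foldl_cons] <;>
      simpa [pvApply] using ih _

theorem pvApply_flatMap (f : Int → List (Nat × (Int × Int × Int))) (l : List Int) (init : List (Int × Int × Int)) :
    pvApply init (l.flatMap f) = l.foldl (fun r y => pvApply r (f y)) init := by
  induction l generalizing init with
  | nil => rfl
  | cons a l ih =>
    simp only [List.flatMap_cons, List.foldl_cons, pvApply, List.foldl_append]
    exact ih _

theorem shift_frame_eq_apply (frame : List (Int × Int × Int)) (width height dx dy : Int) (wrap : Bool) :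
    shift_frame frame width height dx dy wrap =
      pvApply (List.replicate frame.length ((0:Int), (0:Int), (0:Int))) (pvPsA frame width height dx dy wrap) := by
  unfold shift_frame pvPsA
  rw [pvApply_flatMap]
  apply PySem.List.foldl_congr_mem
  intro acc y _
  rw [pvApply_filterMap]
  apply PySem.List.foldl_congr_mem
  intro r x _
  simp only [pvWriteA]
  split_ifs <;> rfl

theorem pvMemA (frame : List (Int × Int × Int)) (width height dx dy : Int) (wrap : Bool)
    (p : Nat × (Int × Int × Int)) :
    p ∈ pvPsA frame width height dx dy wrap ↔
      ∃ y x, 0 ≤ y ∧ y < height ∧ 0 ≤ x ∧ x < width ∧ pvWriteA frame width height dx dy wrap y x = some p := by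
  simp only [pvPsA, List.mem_flatMap, List.mem_filterMap, PySem.List.mem_pyRange_one]
  constructor
  · rintro ⟨y, ⟨h0y, hyh⟩, x, ⟨h0x, hxw⟩, hw⟩; exact ⟨y, x, h0y, hyh, h0x, hxw, hw⟩
  · rintro ⟨y, x, h0y, hyh, h0x, hxw, hw⟩; exact ⟨y, ⟨h0y, hyh⟩, x, ⟨h0x, hxw⟩, hw⟩

-- every write of A carries pvVal of its destination index
theorem pvVal_writeA (frame : List (Int × Int × Int)) (width height dx dy : Int) (wrap : Bool)
    (y x : Int) (h0y : 0 ≤ y) (hyh : y < height) (h0x : 0 ≤ x) (hxw : x < width)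
    (p : Nat × (Int × Int × Int)) (hp : pvWriteA frame width height dx dy wrap y x = some p) :
    pvVal frame width height dx dy wrap p.1 = p.2 ∧ p.1 < frame.length := by
  unfold pvWriteA at hp
  generalize hSX : (if wrap = true then PySem.Int.mod (x - dx) width else x - dx) = SX at hp
  generalize hSY : (if wrap = true then PySem.Int.mod (y - dy) height else y - dy) = SY at hp
  split at hp
  · split at hp
    · rename_i hg1 hg2
      have hpe := Option.some.inj hp
      subst hpe
      have hJ0 : 0 ≤ y * width + x := hg2.2.2.1
      have hJn : y * width + x < (frame.length : Int) := hg2.2.2.2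
      refine ⟨?_, ?_⟩
      · dsimp only
        unfold pvVal
        have hcast : (((y * width + x).toNat : Int)) = y * width + x := Int.toNat_of_nonneg hJ0
        have hJlt : y * width + x < width * height := by
          have e1 : (y + 1) * width = y * width + width := by ring
          have e2 : (y + 1) * width ≤ height * width :=
            mul_le_mul_of_nonneg_right (by omega) (by omega)
          have e3 : height * width = width * height := by ring
          linarith
        rw [hcast, if_pos hJlt]
        rw [pvDiv width y x h0x hxw, pvMod width y x h0x hxw]
        unfold pvGather
        rw [hSX, hSY]
        rw [if_pos hg1]
      · show (y * width + x).toNat < frame.length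
        omega
    · exact absurd hp (by simp)
  · exact absurd hp (by simp)

-- A's result, pointwise
theorem pvA_char (frame : List (Int × Int × Int)) (width height dx dy : Int) (wrap : Bool)
    (hw : 0 < width) (hh : 0 < height) (j : Nat) (hj : j < frame.length) :
    (shift_frame frame width height dx dy wrap)[j]? = some (pvVal frame width height dx dy wrap j) := by
  rw [shift_frame_eq_apply]
  have hG : ∀ p ∈ pvPsA frame width height dx dy wrap,
      (fun i => some (pvVal frame width height dx dy wrap i)) p.1 = some p.2 ∧
        p.1 < (List.replicate frame.length ((0:Int), (0:Int), (0:Int))).length := by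
    intro p hp
    rw [pvMemA] at hp
    obtain ⟨y, x, h0y, hyh, h0x, hxw, hwr⟩ := hp
    have := pvVal_writeA frame width height dx dy wrap y x h0y hyh h0x hxw p hwr
    simpa using this
  rw [pvApply_char _ _ (fun i => some (pvVal frame width height dx dy wrap i)) hG j]
  by_cases hany : (pvPsA frame width height dx dy wrap).any (fun p => p.1 == j)
  · rw [if_pos hany]
  · rw [if_neg hany]
    rw [List.getElem?_replicate, if_pos hj]
    congr 1
    symm
    unfold pvVal
    by_cases hlt : (j : Int) < width * height
    swap
    · rw [if_neg hlt]
    rw [if_pos hlt]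
    unfold pvGather
    set SX := (if wrap = true then PySem.Int.mod ((j : Int) % width - dx) width else (j : Int) % width - dx) with hSX
    set SY := (if wrap = true then PySem.Int.mod ((j : Int) / width - dy) height else (j : Int) / width - dy) with hSY
    by_cases hguard : 0 ≤ SX ∧ SX < width ∧ 0 ≤ SY ∧ SY < height
    swap
    · rw [if_neg hguard]
    rw [if_pos hguard]
    by_cases hsrc : (SY * width + SX).toNat < frame.length
    swap
    · exact pvGetD_default frame _ _ (by omega)
    exfalso
    apply hany
    have hsrc0 : 0 ≤ SY * width + SX := by
      have := mul_nonneg hguard.2.2.1 (le_of_lt hw)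
      omega
    have hdst : ((j : Int) / width) * width + (j : Int) % width = (j : Int) := by
      rw [mul_comm]
      exact Int.ediv_add_emod _ _
    have hwrite : pvWriteA frame width height dx dy wrap ((j : Int) / width) ((j : Int) % width) =
        some (j, frame.getD (SY * width + SX).toNat ((0:Int), (0:Int), (0:Int))) := by
      unfold pvWriteA
      rw [← hSX, ← hSY]
      rw [if_pos hguard]
      rw [if_pos (by refine ⟨hsrc0, by omega, ?_, ?_⟩ <;> rw [hdst] <;> omega)]
      rw [hdst]
      simp
    rw [List.any_eq_true]
    refine ⟨(j, frame.getD (SY * width + SX).toNat ((0:Int), (0:Int), (0:Int))), ?_, by simp⟩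
    rw [pvMemA]
    refine ⟨(j : Int) / width, (j : Int) % width, ?_, ?_, ?_, ?_, hwrite⟩
    · exact Int.ediv_nonneg (by omega) (by omega)
    · rw [Int.ediv_lt_iff_lt_mul hw]
      calc (j : Int) < width * height := hlt
        _ = height * width := by ring
    · exact Int.emod_nonneg _ (by omega)
    · exact Int.emod_lt_of_pos _ hw

theorem pvA_degenerate (frame : List (Int × Int × Int)) (width height dx dy : Int) (wrap : Bool)
    (h : width ≤ 0 ∨ height ≤ 0) :
    shift_frame frame width height dx dy wrap = List.replicate frame.length ((0:Int), (0:Int), (0:Int)) := by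
  unfold shift_frame
  rcases h with hle | hle
  · have hin : PySem.List.pyRange 0 width 1 = [] := by
      rw [PySem.List.pyRange_one]
      rw [show (width - 0).toNat = 0 from by omega]
      rfl
    simp only [hin, List.foldl_nil]
    rw [PySem.List.foldl_ignore]
  · have hout : PySem.List.pyRange 0 height 1 = [] := by
      rw [PySem.List.pyRange_one]
      rw [show (height - 0).toNat = 0 from by omega]
      rfl
    rw [hout]
    rfl

theorem pvA_length (frame : List (Int × Int × Int)) (width height dx dy : Int) (wrap : Bool) :
    (shift_frame frame width height dx dy wrap).length = frame.length := by
  rw [shift_frame_eq_apply, pvApply_length]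
  simp

-- ---- B-side machinery ----

def pvPadded (frame : List (Int × Int × Int)) (width height : Int) : List (Int × Int × Int) :=
  frame.take (width * height).toNat ++ List.replicate ((width * height).toNat - frame.length) ((0:Int), (0:Int), (0:Int))

def pvRows0 (frame : List (Int × Int × Int)) (width height : Int) : List (List (Int × Int × Int)) :=
  (PySem.List.pyRange 0 height 1).map (fun r => (((pvPadded frame width height).toArray).extract (r * width).toNat ((r + 1) * width).toNat).toList)

def pvRows2 (frame : List (Int × Int × Int)) (width height dx dy : Int) (wrap : Bool) : List (List (Int × Int × Int)) :=
  if wrap then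
    PySem.List.slice ((pvRows0 frame width height).map (fun row => PySem.List.slice row (some (PySem.Int.mod (-dx) width)) none ++ PySem.List.slice row none (some (PySem.Int.mod (-dx) width)))) (some (PySem.Int.mod (-dy) height)) none ++
    PySem.List.slice ((pvRows0 frame width height).map (fun row => PySem.List.slice row (some (PySem.Int.mod (-dx) width)) none ++ PySem.List.slice row none (some (PySem.Int.mod (-dx) width)))) none (some (PySem.Int.mod (-dy) height))
  else
    pvShiftList ((pvRows0 frame width height).map (fun row => pvShiftList row dx ((0:Int), (0:Int), (0:Int)))) dy (List.replicate width.toNat ((0:Int), (0:Int), (0:Int)))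

theorem shift_frame_alt_eq (frame : List (Int × Int × Int)) (width height dx dy : Int) (wrap : Bool)
    (h : ¬ (width ≤ 0 ∨ height ≤ 0)) :
    shift_frame_alt frame width height dx dy wrap =
      ((pvRows2 frame width height dx dy wrap).flatMap id).take frame.length ++
        List.replicate (frame.length - (width * height).toNat) ((0:Int), (0:Int), (0:Int)) := by
  unfold shift_frame_alt pvRows2 pvRows0 pvPadded
  rw [if_neg h]

theorem pvPadded_length (frame : List (Int × Int × Int)) (width height : Int) :
    (pvPadded frame width height).length = (width * height).toNat := by
  unfold pvPadded
  rw [List.length_append, List.length_take, List.length_replicate]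
  omega

theorem pvPadded_getElem? (frame : List (Int × Int × Int)) (width height : Int) (i : Nat)
    (hi : i < (width * height).toNat) :
    (pvPadded frame width height)[i]? = some (frame.getD i ((0:Int), (0:Int), (0:Int))) := by
  unfold pvPadded
  by_cases hn : i < frame.length
  · rw [List.getElem?_append_left (by rw [List.length_take]; omega)]
    rw [List.getElem?_take, if_pos hi]
    exact pvGetElem?_eq_getD frame i _ hn
  · rw [List.getElem?_append_right (by rw [List.length_take]; omega)]
    rw [List.length_take]
    rw [List.getElem?_replicate, if_pos (by omega)]
    rw [pvGetD_default frame i _ (by omega)]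

-- one grid row as a slice, rewritten to plain drop/take
theorem pvRow_slice (frame : List (Int × Int × Int)) (width height : Int)
    (hw : 0 < width) (hh : 0 < height) (r : Int) (h0r : 0 ≤ r) (hr : r < height) :
    (((pvPadded frame width height).toArray).extract (r * width).toNat ((r + 1) * width).toNat).toList =
      ((pvPadded frame width height).drop (r.toNat * width.toNat)).take width.toNat := by
  have h0rw : 0 ≤ r * width := mul_nonneg h0r (by omega)
  rw [Array.toList_extract, List.toList_toArray, List.extract_eq_drop_take]
  have e1 : (r + 1) * width = r * width + width := by ring
  have e2 : ((r.toNat * width.toNat : Nat) : Int) = r * width := by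
    push_cast
    rw [Int.toNat_of_nonneg h0r, Int.toNat_of_nonneg (by omega)]
  rw [e1]
  have e3 : (r * width).toNat = r.toNat * width.toNat := by omega
  have e4 : (r * width + width).toNat - (r * width).toNat = width.toNat := by omega
  rw [e4, e3]

theorem pvRows0_length (frame : List (Int × Int × Int)) (width height : Int) :
    (pvRows0 frame width height).length = height.toNat := by
  unfold pvRows0
  rw [List.length_map, PySem.List.length_pyRange_one]
  congr 1
  omega

theorem pvRows0_getElem? (frame : List (Int × Int × Int)) (width height : Int)
    (hw : 0 < width) (hh : 0 < height) (r : Nat) (hr : r < height.toNat) :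
    (pvRows0 frame width height)[r]? =
      some (((pvPadded frame width height).drop (r * width.toNat)).take width.toNat) := by
  unfold pvRows0
  rw [PySem.List.pyRange_one, List.map_map, List.getElem?_map, List.getElem?_range (by omega)]
  simp only [Option.map_some, Function.comp]
  rw [zero_add]
  rw [pvRow_slice frame width height hw hh (r : Int) (by omega) (by omega)]
  rw [show ((r : Nat) : Int).toNat = r from by omega]

theorem pvRowLen (frame : List (Int × Int × Int)) (width height : Int)
    (hw : 0 < width) (hh : 0 < height) (r : Nat) (hr : r < height.toNat) :
    (((pvPadded frame width height).drop (r * width.toNat)).take width.toNat).length = width.toNat := by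
  rw [List.length_take, List.length_drop, pvPadded_length]
  have hS : (width * height).toNat = width.toNat * height.toNat := by
    have : ((width.toNat * height.toNat : Nat) : Int) = width * height := by
      push_cast
      rw [Int.toNat_of_nonneg (by omega), Int.toNat_of_nonneg (by omega)]
    omega
  have h1 : r * width.toNat + width.toNat ≤ width.toNat * height.toNat := by
    calc r * width.toNat + width.toNat = (r + 1) * width.toNat := by ring
      _ ≤ height.toNat * width.toNat := Nat.mul_le_mul_right _ (by omega)
      _ = width.toNat * height.toNat := Nat.mul_comm _ _
  omega

theorem pvRowGet (frame : List (Int × Int × Int)) (width height : Int)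
    (hw : 0 < width) (hh : 0 < height) (r : Nat) (hr : r < height.toNat) (t : Nat) (ht : t < width.toNat) :
    (((pvPadded frame width height).drop (r * width.toNat)).take width.toNat)[t]? =
      some (frame.getD (r * width.toNat + t) ((0:Int), (0:Int), (0:Int))) := by
  rw [List.getElem?_take, if_pos ht, List.getElem?_drop]
  apply pvPadded_getElem?
  have hS : (width * height).toNat = width.toNat * height.toNat := by
    have : ((width.toNat * height.toNat : Nat) : Int) = width * height := by
      push_cast
      rw [Int.toNat_of_nonneg (by omega), Int.toNat_of_nonneg (by omega)]
    omega
  have h1 : r * width.toNat + width.toNat ≤ width.toNat * height.toNat := by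
    calc r * width.toNat + width.toNat = (r + 1) * width.toNat := by ring
      _ ≤ height.toNat * width.toNat := Nat.mul_le_mul_right _ (by omega)
      _ = width.toNat * height.toNat := Nat.mul_comm _ _
  omega

-- (a + (-d) % m) % m = (a - d) % m
theorem pvModShift (a d m : Int) : (a + (-d) % m) % m = (a - d) % m := by
  rw [Int.add_emod, Int.emod_emod_of_dvd _ dvd_rfl, ← Int.add_emod, Int.sub_eq_add_neg]

theorem pvRows0_mem_length (frame : List (Int × Int × Int)) (width height : Int)
    (hw : 0 < width) (hh : 0 < height) (q : List (Int × Int × Int))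
    (hq : q ∈ pvRows0 frame width height) : q.length = width.toNat := by
  unfold pvRows0 at hq
  rw [List.mem_map] at hq
  obtain ⟨r, hr, rfl⟩ := hq
  rw [PySem.List.mem_pyRange_one] at hr
  rw [pvRow_slice frame width height hw hh r hr.1 hr.2]
  exact pvRowLen frame width height hw hh r.toNat (by omega)

theorem pvRows2_length (frame : List (Int × Int × Int)) (width height dx dy : Int) (wrap : Bool)
    (hw : 0 < width) (hh : 0 < height) :
    (pvRows2 frame width height dx dy wrap).length = height.toNat := by
  unfold pvRows2
  have hky0 : 0 ≤ PySem.Int.mod (-dy) height := PySem.Int.mod_nonneg _ hh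
  have hky1 : PySem.Int.mod (-dy) height < height := PySem.Int.mod_lt _ hh
  cases wrap with
  | true =>
    rw [if_pos rfl]
    rw [PySem.List.slice_from _ hky0, PySem.List.slice_to _ hky0]
    rw [List.length_append, List.length_drop, List.length_take, List.length_map, pvRows0_length]
    omega
  | false =>
    rw [if_neg (by simp)]
    rw [pvShiftList_length, List.length_map, pvRows0_length]

theorem pvRows2_mem_length (frame : List (Int × Int × Int)) (width height dx dy : Int) (wrap : Bool)
    (hw : 0 < width) (hh : 0 < height) (row : List (Int × Int × Int))
    (hrow : row ∈ pvRows2 frame width height dx dy wrap) :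
    row.length = width.toNat := by
  unfold pvRows2 at hrow
  have hkx0 : 0 ≤ PySem.Int.mod (-dx) width := PySem.Int.mod_nonneg _ hw
  have hkx1 : PySem.Int.mod (-dx) width < width := PySem.Int.mod_lt _ hw
  have hky0 : 0 ≤ PySem.Int.mod (-dy) height := PySem.Int.mod_nonneg _ hh
  cases wrap with
  | true =>
    rw [if_pos rfl] at hrow
    rw [PySem.List.slice_from _ hky0, PySem.List.slice_to _ hky0] at hrow
    rw [List.mem_append] at hrow
    have hmem : row ∈ ((pvRows0 frame width height).map (fun row => PySem.List.slice row (some (PySem.Int.mod (-dx) width)) none ++ PySem.List.slice row none (some (PySem.Int.mod (-dx) width)))) := by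
      rcases hrow with h | h
      · exact List.mem_of_mem_drop h
      · exact List.mem_of_mem_take h
    rw [List.mem_map] at hmem
    obtain ⟨q, hq, rfl⟩ := hmem
    rw [PySem.List.slice_from _ hkx0, PySem.List.slice_to _ hkx0]
    rw [List.length_append, List.length_drop, List.length_take,
        pvRows0_mem_length frame width height hw hh q hq]
    omega
  | false =>
    rw [if_neg (by simp)] at hrow
    rcases pvShiftList_mem _ _ _ _ hrow with h | h
    · rw [h]; simp
    · rw [List.mem_map] at h
      obtain ⟨q, hq, rfl⟩ := h
      rw [pvShiftList_length]
      exact pvRows0_mem_length frame width height hw hh q hq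

-- the grid cell (y, x) of the shifted grid carries the gathered pixel
theorem pvRows2_get (frame : List (Int × Int × Int)) (width height dx dy : Int) (wrap : Bool)
    (hw : 0 < width) (hh : 0 < height) (y x : Nat) (hy : y < height.toNat) (hx : x < width.toNat) :
    ((pvRows2 frame width height dx dy wrap)[y]?.bind (fun row => row[x]?)) =
      some (pvGather frame width height dx dy wrap (y : Int) (x : Int)) := by
  have hWc : ((width.toNat : Nat) : Int) = width := by omega
  have hHc : ((height.toNat : Nat) : Int) = height := by omega
  unfold pvRows2
  cases wrap with
  | true =>
    rw [if_pos rfl]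
    have hkx0 : 0 ≤ PySem.Int.mod (-dx) width := PySem.Int.mod_nonneg _ hw
    have hkx1 : PySem.Int.mod (-dx) width < width := PySem.Int.mod_lt _ hw
    have hky0 : 0 ≤ PySem.Int.mod (-dy) height := PySem.Int.mod_nonneg _ hh
    have hky1 : PySem.Int.mod (-dy) height < height := PySem.Int.mod_lt _ hh
    rw [PySem.List.slice_from _ hky0, PySem.List.slice_to _ hky0]
    have hMlen : (((pvRows0 frame width height).map (fun row => PySem.List.slice row (some (PySem.Int.mod (-dx) width)) none ++ PySem.List.slice row none (some (PySem.Int.mod (-dx) width))))).length = height.toNat := by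
      rw [List.length_map, pvRows0_length]
    rw [pvRot_getElem? _ _ (by rw [hMlen]; omega) y (by rw [hMlen]; omega)]
    rw [hMlen]
    have hy'H : (y + (PySem.Int.mod (-dy) height).toNat) % height.toNat < height.toNat := Nat.mod_lt _ (by omega)
    have hMget : (((pvRows0 frame width height).map (fun row => PySem.List.slice row (some (PySem.Int.mod (-dx) width)) none ++ PySem.List.slice row none (some (PySem.Int.mod (-dx) width)))))[(y + (PySem.Int.mod (-dy) height).toNat) % height.toNat]? =
        some (PySem.List.slice (((pvPadded frame width height).drop (((y + (PySem.Int.mod (-dy) height).toNat) % height.toNat) * width.toNat)).take width.toNat) (some (PySem.Int.mod (-dx) width)) none ++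
              PySem.List.slice (((pvPadded frame width height).drop (((y + (PySem.Int.mod (-dy) height).toNat) % height.toNat) * width.toNat)).take width.toNat) none (some (PySem.Int.mod (-dx) width))) := by
      rw [List.getElem?_map, pvRows0_getElem? frame width height hw hh _ hy'H]
      rfl
    rw [hMget]
    rw [pvBindSome]
    rw [PySem.List.slice_from _ hkx0, PySem.List.slice_to _ hkx0]
    have hrowlen := pvRowLen frame width height hw hh _ hy'H
    rw [pvRot_getElem? _ _ (by rw [hrowlen]; omega) x (by rw [hrowlen]; omega)]
    rw [hrowlen]
    have hx'W : (x + (PySem.Int.mod (-dx) width).toNat) % width.toNat < width.toNat := Nat.mod_lt _ (by omega)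
    rw [pvRowGet frame width height hw hh _ hy'H _ hx'W]
    rw [pvGather_wrap frame width height dx dy (y : Int) (x : Int) hw hh]
    have hidxI : ((((y + (PySem.Int.mod (-dy) height).toNat) % height.toNat) * width.toNat + ((x + (PySem.Int.mod (-dx) width).toNat) % width.toNat) : Nat) : Int) =
        PySem.Int.mod ((y : Int) - dy) height * width + PySem.Int.mod ((x : Int) - dx) width := by
      push_cast
      rw [Int.toNat_of_nonneg hky0, Int.toNat_of_nonneg hkx0, hWc, hHc]
      simp only [PySem.Int.mod_eq_emod_of_pos hh, PySem.Int.mod_eq_emod_of_pos hw]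
      rw [pvModShift, pvModShift]
    rw [show (((y + (PySem.Int.mod (-dy) height).toNat) % height.toNat) * width.toNat + ((x + (PySem.Int.mod (-dx) width).toNat) % width.toNat)) =
          (PySem.Int.mod ((y : Int) - dy) height * width + PySem.Int.mod ((x : Int) - dx) width).toNat from by omega]
  | false =>
    rw [if_neg (by simp)]
    have h1len : (((pvRows0 frame width height).map (fun row => pvShiftList row dx ((0:Int), (0:Int), (0:Int))))).length = height.toNat := by
      rw [List.length_map, pvRows0_length]
    rw [pvShiftList_getElem? _ dy _ y (by rw [h1len]; omega)]
    rw [h1len]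
    rw [pvBindSome]
    rw [pvGather_nowrap frame width height dx dy (y : Int) (x : Int)]
    by_cases hcy : 0 ≤ (y : Int) - dy ∧ (y : Int) - dy < ((height.toNat : Nat) : Int)
    · rw [if_pos hcy]
      have hSYN : ((y : Int) - dy).toNat < height.toNat := by omega
      have hget : (((pvRows0 frame width height).map (fun row => pvShiftList row dx ((0:Int), (0:Int), (0:Int)))))[((y : Int) - dy).toNat]? =
          some (pvShiftList (((pvPadded frame width height).drop ((((y : Int) - dy).toNat) * width.toNat)).take width.toNat) dx ((0:Int), (0:Int), (0:Int))) := by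
        rw [List.getElem?_map, pvRows0_getElem? frame width height hw hh _ hSYN]
        rfl
      rw [pvGetD_of_getElem? _ _ _ _ hget]
      have hrl := pvRowLen frame width height hw hh _ hSYN
      rw [pvShiftList_getElem? _ dx _ x (by rw [hrl]; omega)]
      rw [hrl]
      by_cases hcx : 0 ≤ (x : Int) - dx ∧ (x : Int) - dx < ((width.toNat : Nat) : Int)
      · rw [if_pos hcx]
        have hSXN : ((x : Int) - dx).toNat < width.toNat := by omega
        rw [pvGetD_of_getElem? _ _ _ _ (pvRowGet frame width height hw hh _ hSYN _ hSXN)]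
        rw [if_pos ⟨hcx.1, by omega, hcy.1, by omega⟩]
        have hidxI : (((((y : Int) - dy).toNat) * width.toNat + (((x : Int) - dx).toNat) : Nat) : Int) =
            ((y : Int) - dy) * width + ((x : Int) - dx) := by
          push_cast
          rw [Int.toNat_of_nonneg hcy.1, Int.toNat_of_nonneg hcx.1, hWc]
        rw [show ((((y : Int) - dy).toNat) * width.toNat + (((x : Int) - dx).toNat)) =
              (((y : Int) - dy) * width + ((x : Int) - dx)).toNat from by omega]
      · rw [if_neg hcx]
        rw [if_neg (by intro hg; exact hcx ⟨hg.1, by omega⟩)]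
    · rw [if_neg hcy]
      rw [List.getElem?_replicate, if_pos hx]
      rw [if_neg (by intro hg; exact hcy ⟨hg.2.2.1, by omega⟩)]

theorem pvFlattenLen (frame : List (Int × Int × Int)) (width height dx dy : Int) (wrap : Bool)
    (hw : 0 < width) (hh : 0 < height) :
    ((pvRows2 frame width height dx dy wrap).flatten).length = (width * height).toNat := by
  have hS : (width * height).toNat = width.toNat * height.toNat := by
    have : ((width.toNat * height.toNat : Nat) : Int) = width * height := by
      push_cast
      rw [Int.toNat_of_nonneg (by omega), Int.toNat_of_nonneg (by omega)]
    omega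
  have hC : width.toNat * height.toNat = height.toNat * width.toNat := Nat.mul_comm _ _
  rw [List.length_flatten]
  have hrep : (pvRows2 frame width height dx dy wrap).map List.length = List.replicate height.toNat width.toNat := by
    rw [List.eq_replicate_iff]
    constructor
    · rw [List.length_map, pvRows2_length frame width height dx dy wrap hw hh]
    · intro l hl
      rw [List.mem_map] at hl
      obtain ⟨q, hq, rfl⟩ := hl
      exact pvRows2_mem_length frame width height dx dy wrap hw hh q hq
  rw [hrep, List.sum_replicate, smul_eq_mul]
  omega

-- B's result, pointwise
theorem pvB_char (frame : List (Int × Int × Int)) (width height dx dy : Int) (wrap : Bool)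
    (hw : 0 < width) (hh : 0 < height) (j : Nat) (hj : j < frame.length) :
    (shift_frame_alt frame width height dx dy wrap)[j]? = some (pvVal frame width height dx dy wrap j) := by
  rw [shift_frame_alt_eq frame width height dx dy wrap (by omega)]
  have hWc : ((width.toNat : Nat) : Int) = width := by omega
  have hS : (width * height).toNat = width.toNat * height.toNat := by
    have : ((width.toNat * height.toNat : Nat) : Int) = width * height := by
      push_cast
      rw [Int.toNat_of_nonneg (by omega), Int.toNat_of_nonneg (by omega)]
    omega
  have hC : width.toNat * height.toNat = height.toNat * width.toNat := Nat.mul_comm _ _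
  have hflat : (pvRows2 frame width height dx dy wrap).flatMap id = (pvRows2 frame width height dx dy wrap).flatten := by
    simp
  have hlens := pvRows2_mem_length frame width height dx dy wrap hw hh
  have hflatlen := pvFlattenLen frame width height dx dy wrap hw hh
  rw [hflat]
  by_cases hjS : j < (width * height).toNat
  · rw [List.getElem?_append_left (by rw [List.length_take, hflatlen]; omega)]
    rw [List.getElem?_take, if_pos hj]
    rw [pvFlatten_getElem? _ width.toNat (by omega) hlens j
          (by rw [pvRows2_length frame width height dx dy wrap hw hh]; omega)]
    have hyH : j / width.toNat < height.toNat := by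
      rw [Nat.div_lt_iff_lt_mul (by omega)]
      omega
    rw [pvRows2_get frame width height dx dy wrap hw hh _ _ hyH (Nat.mod_lt _ (by omega))]
    unfold pvVal
    rw [if_pos (by omega)]
    rw [show ((j / width.toNat : Nat) : Int) = (j : Int) / width from by rw [Int.natCast_div, hWc]]
    rw [show ((j % width.toNat : Nat) : Int) = (j : Int) % width from by rw [Int.natCast_mod, hWc]]
  · rw [List.getElem?_append_right (by rw [List.length_take, hflatlen]; omega)]
    rw [List.length_take, hflatlen]
    rw [List.getElem?_replicate, if_pos (by omega)]
    unfold pvVal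
    rw [if_neg (by omega)]

theorem pvB_length (frame : List (Int × Int × Int)) (width height dx dy : Int) (wrap : Bool) :
    (shift_frame_alt frame width height dx dy wrap).length = frame.length := by
  by_cases hd : width ≤ 0 ∨ height ≤ 0
  · unfold shift_frame_alt
    rw [if_pos hd]
    simp
  · have hw : 0 < width := by omega
    have hh : 0 < height := by omega
    have hflat : (pvRows2 frame width height dx dy wrap).flatMap id = (pvRows2 frame width height dx dy wrap).flatten := by
      simp
    rw [shift_frame_alt_eq frame width height dx dy wrap hd, hflat]
    rw [List.length_append, List.length_take, List.length_replicate,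
        pvFlattenLen frame width height dx dy wrap hw hh]
    omega

theorem pvMain (frame : List (Int × Int × Int)) (width height dx dy : Int) (wrap : Bool) :
    shift_frame frame width height dx dy wrap = shift_frame_alt frame width height dx dy wrap := by
  by_cases hd : width ≤ 0 ∨ height ≤ 0
  · rw [pvA_degenerate frame width height dx dy wrap hd]
    unfold shift_frame_alt
    rw [if_pos hd]
  · have hw : 0 < width := by omega
    have hh : 0 < height := by omega
    apply List.ext_getElem?
    intro j
    by_cases hj : j < frame.length
    · rw [pvA_char frame width height dx dy wrap hw hh j hj,
          pvB_char frame width height dx dy wrap hw hh j hj]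
    · rw [List.getElem?_eq_none (by rw [pvA_length]; omega),
          List.getElem?_eq_none (by rw [pvB_length]; omega)]

-- ===== VERDICT (by name: the statement is the Claim_ definition above) =====
theorem shift_frame_spec : Claim_equal_shift_frame := by
  intro frame width height dx dy wrap _
  unfold Spec_shift_frame
  exact pvMain frame width height dx dy wrap
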